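-- pv_equiv track=rewrite | github.com/srucel/django-cms | cms/utils/urlutils.py | levelize_path
-- ===== SOURCE A (Python) =====
-- def levelize_path(path):
--     """Splits given path to list of paths removing latest level in each step.
--
--     >>> path = '/application/item/new'
--     >>> levelize_path(path)
--     ['/application/item/new', '/application/item', '/application']
--     """
--     parts = path.rstrip("/").split("/")
--     paths = []
--     for i in range(len(parts), 0, -1):
--         sub_path = ('/').join(parts[:i])
--         if sub_path:
--             paths.append(sub_path)
--     return paths
-- ===== SOURCE B (Python) =====
-- def levelize_path(path):
--     """Splits given path to list of paths removing latest level in each step.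
--
--     Peels the last slash-separated segment off the string instead of splitting and
--     re-joining prefix lists.
--     """
--     paths = []
--     current = path.rstrip("/")
--     while current:
--         paths.append(current)
--         i = current.rfind("/")
--         current = current[:i] if i != -1 else ""
--     return paths
-- ===== Notes on version B (the rewrite author's own statement) =====
-- stated objective: alternative
-- what changed: Instead of splitting the path into a parts list and re-joining every prefix parts[:i] for decreasing i, B keeps the string itself and repeatedly peels off the last slash-separated segment with rfind, collecting each non-empty remainder.
import Mathlib
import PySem

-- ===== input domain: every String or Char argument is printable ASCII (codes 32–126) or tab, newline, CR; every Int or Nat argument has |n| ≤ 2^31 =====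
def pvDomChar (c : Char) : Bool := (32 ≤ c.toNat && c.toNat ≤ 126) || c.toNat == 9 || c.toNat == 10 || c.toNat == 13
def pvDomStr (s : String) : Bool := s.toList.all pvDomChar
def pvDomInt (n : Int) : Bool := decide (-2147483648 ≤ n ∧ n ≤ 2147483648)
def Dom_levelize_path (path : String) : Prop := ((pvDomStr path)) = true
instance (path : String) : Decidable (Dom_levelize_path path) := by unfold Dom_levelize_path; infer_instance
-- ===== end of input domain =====

-- B peels the last slash-separated segment off the string with rfind instead of splitting into a parts
-- list and re-joining every prefix; same results, a different decomposition (objective: alternative).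

-- shared helper: exact port of Python's  s.rstrip("/")  (drop any trailing '/' characters);
-- both Pythons perform this very call.
def rstripSlash (s : List Char) : List Char := (s.reverse.dropWhile (· == '/')).reverse

-- ===== PORT A =====
-- loop body of A's `for i in range(len(parts), 0, -1)` loop
def stepA (parts : List (List Char)) (paths : List (List Char)) (i : Int) : List (List Char) :=
  let sub_path := PySem.Chars.join ['/'] (PySem.List.slice parts none (some i))
  if sub_path = [] then paths else paths ++ [sub_path]

def levelize_path (path : String) : List String :=
  let parts := PySem.Chars.splitOn (rstripSlash path.toList) ['/']
  let paths := (PySem.List.pyRange (parts.length : Int) 0 (-1)).foldl (stepA parts) []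
  paths.map String.ofList

-- ===== PORT B =====
-- B's `while current:` loop; the fuel only makes the recursion total (current.length + 1 always suffices)
def peelLoop : Nat → List Char → List (List Char) → List (List Char)
  | 0, _, paths => paths
  | fuel + 1, current, paths =>
    if current = [] then paths
    else
      let i := PySem.Chars.rfind current ['/']
      peelLoop fuel (if i = -1 then [] else PySem.List.slice current none (some i))
        (paths ++ [current])

def levelize_path_alt (path : String) : List String :=
  let current := rstripSlash path.toList
  (peelLoop (current.length + 1) current []).map String.ofList

-- ===== PRECONDITION & SPEC =====
def Spec_levelize_path (path : String) (out : List String) : Prop := out = levelize_path_alt path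
instance (path : String) (out : List String) : Decidable (Spec_levelize_path path out) := by unfold Spec_levelize_path; infer_instance

-- ===== CLAIM (what is proved, stated in full; the proofs are below) =====
def Claim_equal_levelize_path : Prop := ∀ (path : String), Dom_levelize_path path → Spec_levelize_path path (levelize_path path)

-- ===== LEMMAS AND PROOFS =====

-- [ '/' ].isPrefixOf just asks whether the list starts with '/'
theorem isPrefixOf_slash (l : List Char) :
    (['/'] : List Char).isPrefixOf l = (l.head? == some '/') := by
  cases l <;> simp [List.isPrefixOf, eq_comm]

-- definitional unfoldings of the fuelled PySem loops
theorem splitOn_go_cons (f : Nat) (c : Char) (rest cur : List Char) (acc : List (List Char)) :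
    PySem.Chars.splitOn.go ['/'] (f + 1) (c :: rest) cur acc
      = (if (['/'] : List Char).isPrefixOf (c :: rest)
          then PySem.Chars.splitOn.go ['/'] f (List.drop 1 (c :: rest)) [] (cur.reverse :: acc)
          else PySem.Chars.splitOn.go ['/'] f rest (c :: cur) acc) := rfl

theorem splitOn_go_nil (f : Nat) (cur : List Char) (acc : List (List Char)) :
    PySem.Chars.splitOn.go ['/'] (f + 1) [] cur acc = (cur.reverse :: acc).reverse := rfl

theorem rfind_go_zero (s : List Char) :
    PySem.Chars.rfind.go s ['/'] 0 = if (['/'] : List Char).isPrefixOf s then 0 else -1 := rfl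

theorem rfind_go_succ (s : List Char) (j : Nat) :
    PySem.Chars.rfind.go s ['/'] (j + 1)
      = if (['/'] : List Char).isPrefixOf (s.drop (j + 1)) then ((j : Int) + 1)
        else PySem.Chars.rfind.go s ['/'] j := rfl

-- PySem's fuelled splitOn.go computes List.splitOnP, up to the two accumulators
theorem splitOn_go_eq (fuel : Nat) : ∀ (l cur : List Char) (acc : List (List Char)), l.length < fuel →
    PySem.Chars.splitOn.go ['/'] fuel l cur acc
      = acc.reverse ++ (List.splitOnP (· == '/') l).modifyHead (cur.reverse ++ ·) := by
  induction fuel with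
  | zero => intro l cur acc h; omega
  | succ f ih =>
    intro l cur acc h
    cases l with
    | nil => simp [splitOn_go_nil]
    | cons c rest =>
      rw [splitOn_go_cons]
      obtain ⟨hd, tl, he⟩ := List.exists_cons_of_ne_nil (List.splitOnP_ne_nil (· == '/') rest)
      by_cases hc : c = '/'
      · rw [if_pos (by simp [hc])]
        rw [List.drop_succ_cons, List.drop_zero,
          ih rest [] (cur.reverse :: acc) (by simpa using Nat.lt_of_succ_lt_succ h)]
        simp [List.splitOnP_cons, hc, he]
      · rw [if_neg (by simp [isPrefixOf_slash, hc])]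
        rw [ih rest (c :: cur) acc (by simpa using Nat.lt_of_succ_lt_succ h)]
        simp [List.splitOnP_cons, hc, he]

theorem splitOn_eq (s : List Char) :
    PySem.Chars.splitOn s ['/'] = List.splitOnP (· == '/') s := by
  rw [PySem.Chars.splitOn, splitOn_go_eq (s.length + 1) s [] [] (Nat.lt_succ_self _)]
  obtain ⟨hd, tl, he⟩ := List.exists_cons_of_ne_nil (List.splitOnP_ne_nil (· == '/') s)
  simp [he]

-- no piece produced by splitOnP contains the separator
theorem not_mem_of_mem_splitOnP (xs : List Char) : ∀ t ∈ List.splitOnP (· == '/') xs, '/' ∉ t := by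
  induction xs with
  | nil => intro t ht; rw [List.splitOnP_nil] at ht; simp at ht; simp [ht]
  | cons c rest ih =>
    intro t ht
    rw [List.splitOnP_cons] at ht
    by_cases hc : (c == '/') = true
    · rw [if_pos hc] at ht
      rcases List.mem_cons.mp ht with h | h
      · simp [h]
      · exact ih t h
    · rw [if_neg hc] at ht
      obtain ⟨hd, tl, he⟩ := List.exists_cons_of_ne_nil (List.splitOnP_ne_nil (· == '/') rest)
      rw [he, List.modifyHead_cons] at ht
      rcases List.mem_cons.mp ht with h | h
      · subst h
        intro hm
        rcases List.mem_cons.mp hm with h' | h'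
        · exact hc (by simp [← h'])
        · exact ih hd (by rw [he]; exact List.mem_cons_self) h'
      · exact ih t (by rw [he]; exact List.mem_cons_of_mem _ h)

-- rfind on a '/'-free string is -1
theorem rfind_go_not_mem (s : List Char) (hs : '/' ∉ s) :
    ∀ k, PySem.Chars.rfind.go s ['/'] k = -1 := by
  have hpre : ∀ m : Nat, (['/'] : List Char).isPrefixOf (s.drop m) = false := by
    intro m
    rw [isPrefixOf_slash]
    cases hsd : s.drop m with
    | nil => rfl
    | cons a r =>
      simp only [List.head?_cons, beq_eq_false_iff_ne, ne_eq, Option.some.injEq]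
      intro ha
      exact hs (ha ▸ List.drop_subset m s (hsd ▸ List.mem_cons_self))
  intro k
  induction k with
  | zero =>
    have h0 := hpre 0
    rw [List.drop_zero] at h0
    rw [rfind_go_zero, if_neg (by simp [h0])]
  | succ j ih =>
    rw [rfind_go_succ, if_neg (by simp [hpre (j + 1)]), ih]

theorem rfind_not_mem (s : List Char) (hs : '/' ∉ s) :
    PySem.Chars.rfind s ['/'] = -1 := rfind_go_not_mem s hs _

-- rfind finds the LAST '/' of  a ++ '/' :: b  (b free of '/') at index a.length
theorem rfind_go_last (a b : List Char) (hb : '/' ∉ b) :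
    ∀ k, a.length ≤ k → PySem.Chars.rfind.go (a ++ '/' :: b) ['/'] k = a.length := by
  intro k
  induction k with
  | zero =>
    intro hk
    have ha : a = [] := List.eq_nil_of_length_eq_zero (Nat.le_zero.mp hk)
    subst ha
    rw [rfind_go_zero, if_pos (by simp)]
    simp
  | succ j ih =>
    intro hk
    rw [rfind_go_succ]
    by_cases he : j + 1 = a.length
    · have hdrop : (a ++ '/' :: b).drop (j + 1) = '/' :: b := by
        rw [he]; exact List.drop_left
      rw [if_pos (by simp [hdrop])]
      omega
    · have hle : a.length ≤ j := by omega
      have hdrop : (a ++ '/' :: b).drop (j + 1) = b.drop (j - a.length) := by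
        rw [List.drop_append]
        rw [List.drop_eq_nil_of_le (by omega), List.nil_append]
        rw [show j + 1 - a.length = (j - a.length) + 1 by omega, List.drop_succ_cons]
      have hpre : (['/'] : List Char).isPrefixOf ((a ++ '/' :: b).drop (j + 1)) = false := by
        rw [hdrop, isPrefixOf_slash]
        cases hsd : b.drop (j - a.length) with
        | nil => rfl
        | cons x r =>
          simp only [List.head?_cons, beq_eq_false_iff_ne, ne_eq, Option.some.injEq]
          intro hx
          exact hb (hx ▸ List.drop_subset _ b (hsd ▸ List.mem_cons_self))
      rw [if_neg (by simp [hpre]), ih hle]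

theorem rfind_last (a b : List Char) (hb : '/' ∉ b) :
    PySem.Chars.rfind (a ++ '/' :: b) ['/'] = a.length := by
  apply rfind_go_last a b hb
  simp

-- closed form for pyRange n 0 (-1) = [n, n-1, …, 1]
theorem pyRange_rev (n : Nat) :
    PySem.List.pyRange (n : Int) 0 (-1) = (List.range n).map (fun k => ((n - k : Nat) : Int)) := by
  rw [PySem.List.pyRange]
  cases n with
  | zero => simp
  | succ m =>
    rw [if_neg (by norm_num), if_neg (by norm_num), if_pos (by exact_mod_cast Nat.succ_pos m)]
    have h1 : (((m + 1 : Nat) : Int) - 0 + -(-1) - 1) / -(-1) = ((m + 1 : Nat) : Int) := by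
      push_cast; ring_nf; exact Int.ediv_one _
    simp only []
    rw [h1, Int.toNat_natCast]
    apply List.map_congr_left
    intro k hk
    rw [List.mem_range] at hk
    omega

theorem pyRange_rev_succ (n : Nat) :
    PySem.List.pyRange ((n + 1 : Nat) : Int) 0 (-1)
      = ((n + 1 : Nat) : Int) :: PySem.List.pyRange (n : Int) 0 (-1) := by
  rw [pyRange_rev, pyRange_rev, List.range_succ_eq_map]
  simp only [List.map_cons, List.map_map, Nat.sub_zero]
  congr 1
  apply List.map_congr_left
  intro k hk
  simp [Function.comp]

theorem mem_pyRange_rev {n : Nat} {i : Int} (h : i ∈ PySem.List.pyRange (n : Int) 0 (-1)) :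
    1 ≤ i ∧ i ≤ n := by
  rw [pyRange_rev] at h
  simp only [List.mem_map, List.mem_range] at h
  obtain ⟨k, hk, he⟩ := h
  omega

theorem join_append_last (init : List (List Char)) (last : List Char) (h : init ≠ []) :
    PySem.Chars.join ['/'] (init ++ [last])
      = PySem.Chars.join ['/'] init ++ '/' :: last := by
  induction init with
  | nil => exact absurd rfl h
  | cons p rest ih =>
    cases rest with
    | nil => simp [PySem.Chars.join_singleton, PySem.Chars.join_cons_cons]
    | cons q r =>
      have h1 : (p :: q :: r) ++ [last] = p :: q :: (r ++ [last]) := by simp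
      rw [h1, PySem.Chars.join_cons_cons]
      have h2 : q :: (r ++ [last]) = (q :: r) ++ [last] := by simp
      rw [h2, ih (by simp), PySem.Chars.join_cons_cons]
      simp

-- the peel loop on the empty string returns the accumulator whatever the fuel
theorem peelLoop_nil (fuel : Nat) (paths : List (List Char)) :
    peelLoop fuel [] paths = paths := by
  cases fuel <;> simp [peelLoop]

-- zeta-reduced form of A's loop body
theorem stepA_eq (parts paths : List (List Char)) (i : Int) :
    stepA parts paths i
      = (if PySem.Chars.join ['/'] (PySem.List.slice parts none (some i)) = [] then paths
         else paths ++ [PySem.Chars.join ['/'] (PySem.List.slice parts none (some i))]) := rfl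

-- one unfolding of B's while loop on a non-empty current
theorem peelLoop_step (f : Nat) (current : List Char) (paths : List (List Char)) (h : current ≠ []) :
    peelLoop (f + 1) current paths
      = peelLoop f (if PySem.Chars.rfind current ['/'] = -1 then []
                    else PySem.List.slice current none (some (PySem.Chars.rfind current ['/'])))
          (paths ++ [current]) := by
  rw [peelLoop, if_neg h]

-- MAIN: B's peel loop on the joined parts equals A's prefix-join loop
theorem main_lemma (parts : List (List Char)) :
    parts ≠ [] → (∀ t ∈ parts, '/' ∉ t) →
    ∀ (paths : List (List Char)) (fuel : Nat),
      (PySem.Chars.join ['/'] parts).length < fuel →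
      peelLoop fuel (PySem.Chars.join ['/'] parts) paths
        = (PySem.List.pyRange (parts.length : Int) 0 (-1)).foldl (stepA parts) paths := by
  induction parts using List.reverseRecOn with
  | nil => intro h; exact absurd rfl h
  | append_singleton init last ih =>
    intro _ hfree paths fuel hfuel
    have hlast : '/' ∉ last := hfree last (by simp)
    have hslice1 : ∀ (l : List Char), PySem.List.slice [l] none (some 1) = [l] := by
      intro l
      rw [PySem.List.slice_to _ (by norm_num)]
      simp
    cases init with
    | nil =>
      -- parts = [last]
      simp only [List.nil_append] at hfuel ⊢
      rw [PySem.Chars.join_singleton] at hfuel ⊢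
      obtain ⟨f, rfl⟩ : ∃ f, fuel = f + 1 := ⟨fuel - 1, by omega⟩
      have hr : PySem.List.pyRange ((([last] : List (List Char)).length : Int)) 0 (-1)
          = [(1 : Int)] := by
        rw [show ((([last] : List (List Char)).length : Int)) = ((0 + 1 : Nat) : Int) by simp,
          pyRange_rev_succ, pyRange_rev]
        simp
      rw [hr]
      by_cases hl : last = []
      · subst hl
        simp [peelLoop, stepA, hslice1, PySem.Chars.join_singleton]
      · rw [peelLoop_step f last paths hl, rfind_not_mem last hlast, if_pos rfl, peelLoop_nil]
        simp [stepA, hslice1, PySem.Chars.join_singleton, hl]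
    | cons p r =>
      have hinitne : (p :: r) ≠ [] := by simp
      have hjoin := join_append_last (p :: r) last hinitne
      set J := PySem.Chars.join ['/'] (p :: r) with hJ
      have hfull_ne : PySem.Chars.join ['/'] ((p :: r) ++ [last]) ≠ [] := by
        rw [hjoin]; simp
      obtain ⟨f, rfl⟩ : ∃ f, fuel = f + 1 := ⟨fuel - 1, by omega⟩
      rw [peelLoop_step _ _ _ hfull_ne]
      rw [hjoin, rfind_last _ _ hlast,
        if_neg (by intro hc; exact absurd hc (by omega)),
        PySem.List.slice_to _ (by positivity), Int.toNat_natCast, List.take_left]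
      have hflen : J.length < f := by
        rw [hjoin] at hfuel
        simp only [List.length_append, List.length_cons] at hfuel
        omega
      rw [← hjoin]
      have hstep := ih hinitne (fun t ht => hfree t (by simp at ht ⊢; tauto))
        (paths ++ [PySem.Chars.join ['/'] ((p :: r) ++ [last])]) f hflen
      rw [hstep]
      -- now reduce A's side
      have hlen : (((p :: r) ++ [last] : List (List Char)).length : Int)
          = (((p :: r).length + 1 : Nat) : Int) := by simp
      rw [hlen, pyRange_rev_succ, List.foldl_cons]
      have hfirst : stepA ((p :: r) ++ [last]) paths (((p :: r).length + 1 : Nat) : Int)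
          = paths ++ [PySem.Chars.join ['/'] ((p :: r) ++ [last])] := by
        rw [stepA_eq]
        rw [PySem.List.slice_to _ (by positivity), Int.toNat_natCast]
        rw [show ((p :: r).length + 1) = ((p :: r) ++ [last]).length by simp, List.take_length]
        rw [if_neg hfull_ne]
      rw [hfirst]
      apply PySem.List.foldl_congr_mem
      intro acc i hi
      obtain ⟨h1, h2⟩ := mem_pyRange_rev hi
      rw [stepA_eq, stepA_eq]
      rw [PySem.List.slice_to _ (by omega), PySem.List.slice_to _ (by omega)]
      rw [List.take_append_of_le_length (by simpa using (by omega : i.toNat ≤ (p :: r).length))]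

-- ===== VERDICT (by name: the statement is the Claim_ definition above) =====
theorem levelize_path_spec : Claim_equal_levelize_path := by
  intro path _
  unfold Spec_levelize_path levelize_path levelize_path_alt
  simp only []
  congr 1
  have hsplit : PySem.Chars.splitOn (rstripSlash path.toList) ['/']
      = List.splitOnP (· == '/') (rstripSlash path.toList) := splitOn_eq _
  have hjoin : PySem.Chars.join ['/'] (List.splitOnP (· == '/') (rstripSlash path.toList))
      = rstripSlash path.toList := by
    have : List.splitOnP (· == '/') (rstripSlash path.toList)
        = List.splitOn '/' (rstripSlash path.toList) := rfl
    rw [this]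
    exact List.intercalate_splitOn _ '/'
  rw [hsplit]
  have hm := main_lemma (List.splitOnP (· == '/') (rstripSlash path.toList))
    (List.splitOnP_ne_nil _ _) (not_mem_of_mem_splitOnP _) []
    ((rstripSlash path.toList).length + 1) (by rw [hjoin]; exact Nat.lt_succ_self _)
  rw [hjoin] at hm
  exact hm.symm
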